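-- pv_equiv track=rewrite | github.com/JorgeIba/Competitive-Programming-Problems | ICPC México 2020 - Repechaje/F.py | linea
-- ===== SOURCE A (Python) =====
-- def linea(n): ## (i, j) -- (k, l)
--   ans = 0
--   for i in range(0,n):
--     for j in range(0,n):
--       for k in range(2*n, 3*n):
--         for l in range(0, n):
--           ans += abs(i-k)  + abs(j-l)
--   return ans//2
-- ===== SOURCE B (Python) =====
-- def linea(n):
--     # Closed form: sum over the 4D grid factors into separable index sums;
--     # total = (7*n**5 - n**3)/3, halved -> (7*n**5 - n**3)//6.
--     if n <= 0:
--         return 0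
--     return (7*n**5 - n**3) // 6
-- ===== Notes on version B (the rewrite author's own statement) =====
-- stated objective: faster
-- what changed: Replaced the quadruple nested loop over the 4D index grid by a closed-form polynomial (7*n^5 - n^3)//6 obtained by factorising the separable absolute-difference sums.
import Mathlib
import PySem

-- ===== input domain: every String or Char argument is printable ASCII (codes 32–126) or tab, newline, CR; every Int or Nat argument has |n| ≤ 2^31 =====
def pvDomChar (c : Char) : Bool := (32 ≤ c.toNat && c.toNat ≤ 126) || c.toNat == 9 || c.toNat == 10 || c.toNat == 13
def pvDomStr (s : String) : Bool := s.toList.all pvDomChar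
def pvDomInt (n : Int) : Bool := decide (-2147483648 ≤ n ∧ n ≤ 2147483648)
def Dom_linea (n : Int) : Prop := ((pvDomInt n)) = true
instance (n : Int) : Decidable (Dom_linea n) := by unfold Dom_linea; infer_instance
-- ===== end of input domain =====

-- B replaces A's O(n^4) quadruple loop by the closed-form polynomial (7n^5 - n^3)//6 (faster, asymptotic).

-- ===== PORT A =====
def linea (n : Int) : Int :=
  let ans : Int := (PySem.List.pyRange 0 n 1).foldl (fun ans i =>
    (PySem.List.pyRange 0 n 1).foldl (fun ans j =>
      (PySem.List.pyRange (2*n) (3*n) 1).foldl (fun ans k =>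
        (PySem.List.pyRange 0 n 1).foldl (fun ans l =>
          ans + (|i - k| + |j - l|)) ans) ans) ans) 0
  PySem.Int.floordiv ans 2

-- ===== PORT B =====
def linea_alt (n : Int) : Int :=
  if n ≤ 0 then 0 else PySem.Int.floordiv (7 * n ^ 5 - n ^ 3) 6

-- ===== PRECONDITION & SPEC =====
def Spec_linea (n : Int) (out : Int) : Prop := out = linea_alt n
instance (n : Int) (out : Int) : Decidable (Spec_linea n out) := by unfold Spec_linea; infer_instance

-- ===== CLAIM (what is proved, stated in full; the proofs are below) =====
def Claim_equal_linea : Prop := ∀ (n : Int), Dom_linea n → Spec_linea n (linea n)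

-- ===== LEMMAS AND PROOFS =====

theorem pv_sum_map_range (f : Nat → Int) (m : Nat) :
    ((List.range m).map f).sum = ∑ x ∈ Finset.range m, f x := by
  induction m with
  | zero => simp
  | succ m ih => simp [List.range_succ, Finset.sum_range_succ, ih]

theorem pv_gauss (m : Nat) : 2 * ∑ x ∈ Finset.range m, (x : Int) = m * (m - 1) := by
  induction m with
  | zero => simp
  | succ m ih =>
    rw [Finset.sum_range_succ]
    push_cast [Nat.cast_succ] at *
    ring_nf at *
    linarith

theorem pv_absSum (m : Nat) :
    3 * ∑ j ∈ Finset.range m, ∑ l ∈ Finset.range m, |(j : Int) - l| =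
      (m : Int) ^ 3 - m := by
  induction m with
  | zero => simp
  | succ m ih =>
    have h1 := pv_gauss m
    have e1 : ∑ l ∈ Finset.range m, |(m : Int) - l| =
        ∑ l ∈ Finset.range m, ((m : Int) - l) := by
      refine Finset.sum_congr rfl (fun l hl => ?_)
      have := Finset.mem_range.mp hl
      rw [abs_of_nonneg (by omega)]
    have e2 : ∑ j ∈ Finset.range m, |(j : Int) - m| =
        ∑ j ∈ Finset.range m, ((m : Int) - j) := by
      refine Finset.sum_congr rfl (fun j hj => ?_)
      have := Finset.mem_range.mp hj
      rw [abs_of_nonpos (by omega)]; ring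
    simp only [Finset.sum_range_succ, Finset.sum_add_distrib, e1, e2,
      Finset.sum_sub_distrib, Finset.sum_const, Finset.card_range,
      nsmul_eq_mul, sub_self, abs_zero, add_zero]
    push_cast
    linear_combination ih - 3 * h1

theorem pv_quad (m : Nat) :
    3 * ∑ i ∈ Finset.range m, ∑ j ∈ Finset.range m, ∑ k ∈ Finset.range m,
        ∑ l ∈ Finset.range m, (|(i : Int) - (2 * m + k)| + |(j : Int) - l|) =
      7 * (m : Int) ^ 5 - (m : Int) ^ 3 := by
  have habs : ∑ i ∈ Finset.range m, ∑ j ∈ Finset.range m, ∑ k ∈ Finset.range m,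
        ∑ l ∈ Finset.range m, (|(i : Int) - (2 * m + k)| + |(j : Int) - l|) =
      ∑ i ∈ Finset.range m, ∑ j ∈ Finset.range m, ∑ k ∈ Finset.range m,
        ∑ l ∈ Finset.range m, ((2 * (m : Int) + k - i) + |(j : Int) - l|) := by
    refine Finset.sum_congr rfl (fun i hi => Finset.sum_congr rfl (fun j _ =>
      Finset.sum_congr rfl (fun k _ => Finset.sum_congr rfl (fun l _ => ?_))))
    have := Finset.mem_range.mp hi
    rw [abs_of_nonpos (by omega)]; ring
  rw [habs]
  have hT := pv_absSum m
  simp only [Finset.sum_add_distrib, Finset.sum_sub_distrib, Finset.sum_const,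
    Finset.card_range, nsmul_eq_mul, ← Finset.mul_sum]
  ring_nf
  ring_nf at hT
  linear_combination (m : Int) ^ 2 * hT

theorem linea_eq_sum (n : Int) :
    linea n = PySem.Int.floordiv
      (((PySem.List.pyRange 0 n 1).map (fun i =>
        ((PySem.List.pyRange 0 n 1).map (fun j =>
          ((PySem.List.pyRange (2*n) (3*n) 1).map (fun k =>
            ((PySem.List.pyRange 0 n 1).map (fun l => |i - k| + |j - l|)).sum)).sum)).sum)).sum) 2 := by
  simp [linea, PySem.List.foldl_add]

-- ===== VERDICT (by name: the statement is the Claim_ definition above) =====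
theorem linea_spec : Claim_equal_linea := by
  intro n _
  unfold Spec_linea linea_alt
  rw [linea_eq_sum]
  by_cases hn : n ≤ 0
  · rw [PySem.List.pyRange_one_eq_nil (by omega)]
    simp [hn, PySem.Int.floordiv]
  · simp only [if_neg hn]
    set m : Nat := n.toNat with hm
    have hnm : (m : Int) = n := Int.toNat_of_nonneg (by omega)
    have hlen0 : ((n : Int) - 0).toNat = m := by omega
    have hlen2 : ((3 * n) - 2 * n).toNat = m := by omega
    rw [PySem.List.pyRange_one (a := 0) (b := n),
        PySem.List.pyRange_one (a := 2*n) (b := 3*n), hlen0, hlen2]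
    simp only [List.map_map, Function.comp_def, zero_add, pv_sum_map_range]
    have h3 := pv_quad m
    rw [hnm] at h3
    have hS : ∑ i ∈ Finset.range m, ∑ j ∈ Finset.range m, ∑ k ∈ Finset.range m,
        ∑ l ∈ Finset.range m, (|(i : Int) - (2 * n + k)| + |(j : Int) - l|) =
        (7 * n ^ 5 - n ^ 3) / 3 := by omega
    rw [hS]
    rw [PySem.Int.floordiv_eq_ediv_of_pos (by norm_num),
        PySem.Int.floordiv_eq_ediv_of_pos (by norm_num)]
    have h6 : (6 : Int) = 3 * 2 := by norm_num
    have hdvd : (3 : Int) ∣ (7 * n ^ 5 - n ^ 3) := ⟨_, (by omega : 7 * n ^ 5 - n ^ 3 = 3 * ((7 * n ^ 5 - n ^ 3) / 3))⟩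
    obtain ⟨c, hc⟩ := hdvd
    rw [hc, h6, Int.mul_ediv_mul_of_pos _ _ (by norm_num),
        Int.mul_ediv_cancel_left _ (by norm_num)]
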